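-- pv_equiv track=rewrite | github.com/Dahlkar/advent-of-code | 2015/3/main.py | track_path_two
-- ===== SOURCE A (Python) =====
-- class House:
--     def __init__(self, x, y):
--         self.x = x
--         self.y = y
--
--     def __str__(self):
--         return f'House({self.x}, {self.y})'
--
--     def __repr__(self):
--         return str(self)
--
--     def __eq__(self, o):
--         return self.x == o.x and self.y == o.y
--
--     def __hash__(self):
--         return hash((self.x, self.y))
--
--     def left(self):
--         return House(self.x - 1, self.y)
--
--     def right(self):
--         return House(self.x + 1, self.y)
--
--     def up(self):
--         return House(self.x, self.y + 1)
--
--     def down(self):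
--         return House(self.x, self.y - 1)
--
-- def direction(house, d):
--     match d:
--         case '>':
--             return house.right()
--         case '<':
--             return house.left()
--         case '^':
--             return house.up()
--         case 'v':
--             return house.down()
--         case _:
--             pass
--
-- def track_path_two(path):
--     santa_position = House(0, 0)
--     houses = {santa_position}
--     robo_position = House(0, 0)
--
--     for i, d in enumerate(path):
--         if d == '\n':
--             break
--         if i % 2 == 0:
--             santa_position = direction(santa_position, d)
--             houses.add(santa_position)
--         else:
--             robo_position = direction(robo_position, d)
--             houses.add(robo_position)
--
--     return len(houses)
-- ===== SOURCE B (Python) =====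
-- class House:
--     def __init__(self, x, y):
--         self.x = x
--         self.y = y
--
--     def __eq__(self, o):
--         return self.x == o.x and self.y == o.y
--
--     def __hash__(self):
--         return hash((self.x, self.y))
--
--     def left(self):
--         return House(self.x - 1, self.y)
--
--     def right(self):
--         return House(self.x + 1, self.y)
--
--     def up(self):
--         return House(self.x, self.y + 1)
--
--     def down(self):
--         return House(self.x, self.y - 1)
--
-- def direction(house, d):
--     match d:
--         case '>':
--             return house.right()
--         case '<':
--             return house.left()
--         case '^':
--             return house.up()
--         case 'v':
--             return house.down()
--         case _:
--             pass
--
-- def track_path_two(path):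
--     s = path.split('\n', 1)[0]
--     houses = {House(0, 0)}
--     for moves in (s[0::2], s[1::2]):
--         pos = House(0, 0)
--         for d in moves:
--             pos = direction(pos, d)
--             houses.add(pos)
--     return len(houses)
-- ===== Notes on version B (the rewrite author's own statement) =====
-- stated objective: alternative
-- what changed: B truncates the path at the first newline, de-interleaves it into Santa's moves (s[0::2]) and Robo's moves (s[1::2]), and runs two independent passes over one shared set, instead of A's single interleaved pass with an enumerate parity test and a break.
import Mathlib
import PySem

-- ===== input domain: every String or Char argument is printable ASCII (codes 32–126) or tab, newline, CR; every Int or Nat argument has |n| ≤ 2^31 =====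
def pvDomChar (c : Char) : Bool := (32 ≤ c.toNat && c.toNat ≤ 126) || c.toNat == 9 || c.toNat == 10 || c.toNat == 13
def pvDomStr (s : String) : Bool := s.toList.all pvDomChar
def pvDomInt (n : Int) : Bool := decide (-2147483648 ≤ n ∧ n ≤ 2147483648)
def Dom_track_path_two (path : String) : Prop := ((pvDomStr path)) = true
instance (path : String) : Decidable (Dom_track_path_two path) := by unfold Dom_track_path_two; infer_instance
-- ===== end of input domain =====

-- B de-interleaves the path into Santa's and Robo's move strings and runs two independent
-- passes over one shared set, instead of A's single interleaved pass with a parity test;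
-- objective: alternative decomposition (same asymptotic cost).

-- ===== PORT A =====
-- House(x, y) is modelled as Int × Int; a position is Option (Int × Int): Python's
-- direction() returns None on an unknown character, so positions can become None and
-- None is added to the set.  direction(None, valid char) raises AttributeError in
-- Python — those inputs are excluded by Pre_; the port returns none there.
def direction (house : Option (Int × Int)) (d : Char) : Option (Int × Int) :=
  if d = '>' then house.map (fun h => (h.1 + 1, h.2))
  else if d = '<' then house.map (fun h => (h.1 - 1, h.2))
  else if d = '^' then house.map (fun h => (h.1, h.2 + 1))
  else if d = 'v' then house.map (fun h => (h.1, h.2 - 1))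
  else none

-- the 'for i, d in enumerate(path)' loop of A, with its '\n' break and parity test
def aLoop (cs : List Char) (i : Nat) (santa robo : Option (Int × Int))
    (houses : PySem.Set (Option (Int × Int))) : PySem.Set (Option (Int × Int)) :=
  match cs with
  | [] => houses
  | c :: rest =>
    if c = '\n' then houses
    else if i % 2 = 0 then
      let s' := direction santa c
      aLoop rest (i + 1) s' robo (houses.add s')
    else
      let r' := direction robo c
      aLoop rest (i + 1) santa r' (houses.add r')

def track_path_two (path : String) : Int :=
  PySem.Set.len
    (aLoop path.toList 0 (some (0, 0)) (some (0, 0)) (PySem.Set.ofList [some (0, 0)]))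

-- ===== PORT B =====
-- s[0::2] and s[1::2] (de-interleaving; exact for step-2 slices of the whole list)
mutual
def evens : List Char → List Char
  | [] => []
  | c :: rest => c :: odds rest
def odds : List Char → List Char
  | [] => []
  | _ :: rest => evens rest
end

-- one inner 'for d in moves' pass of B: state is (pos, houses)
def bStep (st : Option (Int × Int) × PySem.Set (Option (Int × Int))) (d : Char) :
    Option (Int × Int) × PySem.Set (Option (Int × Int)) :=
  let p := direction st.1 d
  (p, st.2.add p)

def bRun (houses : PySem.Set (Option (Int × Int))) (moves : List Char) :
    PySem.Set (Option (Int × Int)) :=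
  (moves.foldl bStep (some (0, 0), houses)).2

def track_path_two_alt (path : String) : Int :=
  let s := path.toList.takeWhile (fun c => c ≠ '\n')   -- path.split('\n', 1)[0]
  PySem.Set.len (bRun (bRun (PySem.Set.ofList [some (0, 0)]) (evens s)) (odds s))

-- ===== PRECONDITION & SPEC =====
def pvIsDir (c : Char) : Bool := c = '>' || c = '<' || c = '^' || c = 'v'
-- parity substream of a list: characters at even (par = 0) / odd (par = 1) indices
def pvStream (par : Nat) (l : List Char) : List Char :=
  (l.zipIdx.filter (fun p => p.2 % 2 == par)).map (·.1)
-- "direction chars, then only non-direction chars" — A crashes exactly when, in one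
-- agent's substream before the first newline, a direction char follows a junk char
def pvNoLateDir (l : List Char) : Prop := (l.dropWhile pvIsDir).all (fun c => !pvIsDir c) = true
-- Pre_ excludes exactly the inputs on which A raises AttributeError (direction()
-- returned None for an unknown character and a later same-parity character is a
-- direction char, so None.right()/… is called); A returns on every other input.
def Pre_track_path_two (path : String) : Prop :=
  pvNoLateDir (pvStream 0 (path.toList.takeWhile (fun c => c ≠ '\n'))) ∧
  pvNoLateDir (pvStream 1 (path.toList.takeWhile (fun c => c ≠ '\n')))
instance (path : String) : Decidable (Pre_track_path_two path) := by
  unfold Pre_track_path_two pvNoLateDir; infer_instance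

def pvWitness_track_path_two : String := "^>v<>"

def Spec_track_path_two (path : String) (out : Int) : Prop := out = track_path_two_alt path
instance (path : String) (out : Int) : Decidable (Spec_track_path_two path out) := by
  unfold Spec_track_path_two; infer_instance

-- ===== CLAIM (what is proved, stated in full; the proofs are below) =====
def Claim_equal_track_path_two : Prop := ∀ (path : String), Dom_track_path_two path → Pre_track_path_two path → Spec_track_path_two path (track_path_two path)

-- ===== LEMMAS AND PROOFS =====

-- the list of positions visited from p along the moves (what both ports add to the set)
def trail (p : Option (Int × Int)) : List Char → List (Option (Int × Int))
  | [] => []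
  | c :: rest => direction p c :: trail (direction p c) rest

theorem bFold (moves : List Char) : ∀ (p : Option (Int × Int))
    (hs : PySem.Set (Option (Int × Int))),
    (moves.foldl bStep (p, hs)).2 = hs.update (trail p moves) := by
  induction moves with
  | nil => intro p hs; simp [trail, PySem.Set.update_nil]
  | cons c rest ih =>
    intro p hs
    simp only [List.foldl_cons, bStep, trail, PySem.Set.update_cons]
    exact ih _ _

theorem aLoop_takeWhile (cs : List Char) : ∀ (i : Nat) (s r : Option (Int × Int))
    (hs : PySem.Set (Option (Int × Int))),
    aLoop cs i s r hs = aLoop (cs.takeWhile (fun c => c ≠ '\n')) i s r hs := by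
  induction cs with
  | nil => intro i s r hs; rfl
  | cons c rest ih =>
    intro i s r hs
    by_cases hc : c = '\n'
    · simp [aLoop, hc]
    · by_cases hi : i % 2 = 0 <;>
        simp [aLoop, hc, hi, ih]

theorem mem_aLoop (cs : List Char) : ∀ (i : Nat) (s r : Option (Int × Int))
    (hs : PySem.Set (Option (Int × Int))) (x : Option (Int × Int)),
    (∀ c ∈ cs, c ≠ '\n') →
    (x ∈ aLoop cs i s r hs ↔
      x ∈ hs ∨ x ∈ trail (if i % 2 = 0 then s else r) (evens cs) ∨
        x ∈ trail (if i % 2 = 0 then r else s) (odds cs)) := by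
  induction cs with
  | nil => intro i s r hs x _; simp [aLoop, evens, odds, trail]
  | cons c rest ih =>
    intro i s r hs x hnl
    have hc : c ≠ '\n' := hnl c (by simp)
    have hrest : ∀ c' ∈ rest, c' ≠ '\n' := fun c' h => hnl c' (by simp [h])
    have he : evens (c :: rest) = c :: odds rest := rfl
    have ho : odds (c :: rest) = evens rest := rfl
    by_cases hi : i % 2 = 0
    · have hi1 : (i + 1) % 2 ≠ 0 := by omega
      simp only [aLoop, if_neg hc, if_pos hi]
      rw [ih (i + 1) (direction s c) r _ x hrest]
      rw [if_neg hi1, if_neg hi1, he, ho]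
      simp only [trail, PySem.Set.mem_add, List.mem_cons]
      tauto
    · have hi1 : (i + 1) % 2 = 0 := by omega
      simp only [aLoop, if_neg hc, if_neg hi]
      rw [ih (i + 1) s (direction r c) _ x hrest]
      rw [if_pos hi1, if_pos hi1, he, ho]
      simp only [trail, PySem.Set.mem_add, List.mem_cons]
      tauto

theorem nodup_aLoop (cs : List Char) : ∀ (i : Nat) (s r : Option (Int × Int))
    (hs : PySem.Set (Option (Int × Int))), hs.Nodup → (aLoop cs i s r hs).Nodup := by
  induction cs with
  | nil => intro i s r hs h; exact h
  | cons c rest ih =>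
    intro i s r hs h
    by_cases hc : c = '\n'
    · simpa [aLoop, hc] using h
    · by_cases hi : i % 2 = 0
      · simp only [aLoop, if_neg hc, if_pos hi]
        exact ih _ _ _ _ (PySem.Set.nodup_add _ _ h)
      · simp only [aLoop, if_neg hc, if_neg hi]
        exact ih _ _ _ _ (PySem.Set.nodup_add _ _ h)

-- ===== VERDICT (by name: the statement is the Claim_ definition above) =====
theorem track_path_two_spec : Claim_equal_track_path_two := by
  unfold Claim_equal_track_path_two
  intro path _ _
  unfold Spec_track_path_two track_path_two track_path_two_alt
  set t := path.toList.takeWhile (fun c => c ≠ '\n') with ht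
  have hnl : ∀ c ∈ t, c ≠ '\n' := by
    intro c hcm
    have := List.mem_takeWhile_imp hcm
    simpa using this
  have hA := aLoop_takeWhile path.toList 0 (some (0, 0)) (some (0, 0))
      (PySem.Set.ofList [some (0, 0)])
  rw [hA]
  have hnodup0 : (PySem.Set.ofList [some ((0 : Int), (0 : Int))]).Nodup :=
    PySem.Set.nodup_ofList _
  have hperm :
      (aLoop t 0 (some (0, 0)) (some (0, 0)) (PySem.Set.ofList [some (0, 0)])).Perm
        (bRun (bRun (PySem.Set.ofList [some (0, 0)]) (evens t)) (odds t)) := by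
    rw [List.perm_ext_iff_of_nodup (nodup_aLoop _ _ _ _ _ hnodup0)
      (by
        unfold bRun
        rw [bFold, bFold]
        exact PySem.Set.nodup_update _ _ (PySem.Set.nodup_update _ _ hnodup0))]
    intro x
    rw [mem_aLoop t 0 _ _ _ x hnl]
    unfold bRun
    rw [bFold, bFold]
    rw [PySem.Set.mem_update, PySem.Set.mem_update]
    tauto
  unfold PySem.Set.len
  rw [hperm.length_eq]
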